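-- pv_equiv track=rewrite | github.com/zengtian006/LeetCode | Hackerrank/String/Alternating Characters.py | alternatingCharacters
-- ===== SOURCE A (Python) =====
-- def alternatingCharacters(s):
--     i = 0
--     j = 1
--     count = 0
--     while j<len(s):
--         if s[j] == s[i]:
--             while j<len(s) and s[j] == s[i]:
--                 j+=1
--             count += j-i-1
--         i = j
--         j += 1
--     return count
-- ===== SOURCE B (Python) =====
-- def alternatingCharacters(s):
--     if not s:
--         return 0
--     count = 0
--     prev = s[0]
--     for c in s[1:]:
--         if c == prev:
--             count += 1
--         prev = c
--     return count
-- ===== Notes on version B (the rewrite author's own statement) =====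
-- stated objective: simpler
-- what changed: Replaced A's nested run-skipping while loops (skip a whole equal run, add run_length-1) with a single flat pass that keeps the previous character and counts equal adjacent pairs.
import Mathlib
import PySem

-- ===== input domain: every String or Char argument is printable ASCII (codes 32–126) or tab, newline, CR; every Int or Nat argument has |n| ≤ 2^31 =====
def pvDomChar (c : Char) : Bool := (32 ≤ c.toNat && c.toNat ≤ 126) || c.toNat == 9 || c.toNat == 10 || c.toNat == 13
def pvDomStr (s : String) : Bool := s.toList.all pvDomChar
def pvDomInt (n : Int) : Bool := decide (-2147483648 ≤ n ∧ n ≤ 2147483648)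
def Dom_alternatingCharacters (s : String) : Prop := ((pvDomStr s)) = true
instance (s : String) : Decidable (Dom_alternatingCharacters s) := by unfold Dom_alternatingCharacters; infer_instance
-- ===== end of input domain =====

-- B replaces A's nested run-skipping loops with one flat pass counting equal adjacent pairs (simpler; same result).

-- ===== PORT A =====
-- inner 'while j < len(s) and s[j] == s[i]: j += 1'; fuel = len(s) - j bounds the
-- iteration count (j strictly increases and the loop needs j < len(s)), so the
-- fuel guard only makes the same computation total
def pvSkipA (cs : List Char) (i : Nat) : Nat → Nat → Nat
  | 0, j => j
  | fuel + 1, j =>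
    if j < cs.length ∧ cs[j]! == cs[i]! then pvSkipA cs i fuel (j + 1) else j

-- outer 'while j < len(s): …'; fuel = len(s) bounds its iteration count (j starts
-- at 1 and strictly increases while j < len(s))
def pvLoopA (cs : List Char) : Nat → Nat → Nat → Int → Int
  | 0, _, _, count => count
  | fuel + 1, i, j, count =>
    if j < cs.length then
      if cs[j]! == cs[i]! then
        let j' := pvSkipA cs i (cs.length - j) j
        pvLoopA cs fuel j' (j' + 1) (count + ((j' : Int) - (i : Int) - 1))
      else
        pvLoopA cs fuel j (j + 1) count
    else count

def alternatingCharacters (s : String) : Int :=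
  pvLoopA s.toList s.toList.length 0 1 0

-- ===== PORT B =====
-- 'for c in s[1:]: if c == prev: count += 1; prev = c'
def pvLoopB (l : List Char) (prev : Char) (count : Int) : Int :=
  match l with
  | [] => count
  | c :: rest => pvLoopB rest c (if c == prev then count + 1 else count)

def alternatingCharacters_alt (s : String) : Int :=
  match s.toList with
  | [] => 0
  | c :: rest => pvLoopB rest c 0

-- ===== PRECONDITION & SPEC =====
def Spec_alternatingCharacters (s : String) (out : Int) : Prop := out = alternatingCharacters_alt s
instance (s : String) (out : Int) : Decidable (Spec_alternatingCharacters s out) := by unfold Spec_alternatingCharacters; infer_instance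

-- ===== CLAIM (what is proved, stated in full; the proofs are below) =====
def Claim_equal_alternatingCharacters : Prop := ∀ (s : String), Dom_alternatingCharacters s → Spec_alternatingCharacters s (alternatingCharacters s)

-- ===== LEMMAS AND PROOFS =====

-- number of equal adjacent pairs; both programs compute this
def pairsCnt : List Char → Int
  | a :: b :: t => (if a == b then 1 else 0) + pairsCnt (b :: t)
  | _ => 0

theorem pairsCnt_short (l : List Char) (h : l.length ≤ 1) : pairsCnt l = 0 := by
  match l, h with
  | [], _ => rfl
  | [a], _ => rfl

theorem pairsCnt_drop_of_ge (cs : List Char) (i : Nat) (h : cs.length ≤ i + 1) :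
    pairsCnt (cs.drop i) = 0 := by
  apply pairsCnt_short
  simp [List.length_drop]; omega

theorem pairsCnt_drop_step (cs : List Char) (i : Nat) (h : i + 1 < cs.length) :
    pairsCnt (cs.drop i) =
      (if cs[i]! == cs[i + 1]! then (1 : Int) else 0) + pairsCnt (cs.drop (i + 1)) := by
  have h0 : i < cs.length := by omega
  rw [List.drop_eq_getElem_cons h0, List.drop_eq_getElem_cons h]
  rw [pairsCnt, ← List.drop_eq_getElem_cons h]
  rw [getElem!_pos cs i h0, getElem!_pos cs (i + 1) h]

-- B: the flat pass counts equal adjacent pairs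
theorem pvLoopB_eq (l : List Char) : ∀ (prev : Char) (count : Int),
    pvLoopB l prev count = count + pairsCnt (prev :: l) := by
  induction l with
  | nil => intro prev count; simp [pvLoopB, pairsCnt]
  | cons c rest ih =>
    intro prev count
    rw [pvLoopB, ih, pairsCnt]
    by_cases h : c = prev
    · subst h
      simp only [beq_self_eq_true, if_true]
      ring
    · have h1 : (c == prev) = false := by simp [h]
      have h2 : (prev == c) = false := by simp [Ne.symm h]
      rw [h1, h2]; simp

-- pvSkipA never moves j backwards
theorem pvSkipA_ge (cs : List Char) (i : Nat) :
    ∀ (fuel j : Nat), j ≤ pvSkipA cs i fuel j := by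
  intro fuel
  induction fuel with
  | zero => intro j; simp [pvSkipA]
  | succ fuel ih =>
    intro j
    by_cases hc : j < cs.length ∧ cs[j]! == cs[i]!
    · simp only [pvSkipA]; rw [if_pos hc]
      have := ih (j + 1); omega
    · simp only [pvSkipA]; rw [if_neg hc]

-- pvSkipA stays within the string
theorem pvSkipA_le (cs : List Char) (i : Nat) :
    ∀ (fuel j : Nat), j ≤ cs.length → pvSkipA cs i fuel j ≤ cs.length := by
  intro fuel
  induction fuel with
  | zero => intro j hj; simpa [pvSkipA] using hj
  | succ fuel ih =>
    intro j hj
    by_cases hc : j < cs.length ∧ cs[j]! == cs[i]!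
    · simp only [pvSkipA]; rw [if_pos hc]; exact ih (j + 1) (by omega)
    · simp only [pvSkipA]; rw [if_neg hc]; exact hj

-- every character the inner loop skips equals cs[i]
theorem pvSkipA_run (cs : List Char) (i : Nat) :
    ∀ (fuel j : Nat), ∀ k, j ≤ k → k < pvSkipA cs i fuel j → cs[k]! = cs[i]! := by
  intro fuel
  induction fuel with
  | zero => intro j k hk1 hk2; simp only [pvSkipA] at hk2; omega
  | succ fuel ih =>
    intro j k hk1 hk2
    by_cases hc : j < cs.length ∧ cs[j]! == cs[i]!
    · simp only [pvSkipA] at hk2; rw [if_pos hc] at hk2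
      rcases Nat.eq_or_lt_of_le hk1 with rfl | hlt
      · exact beq_iff_eq.mp hc.2
      · exact ih (j + 1) k hlt hk2
    · simp only [pvSkipA] at hk2; rw [if_neg hc] at hk2; omega

-- with enough fuel the inner loop stops only at the end or at a different character
theorem pvSkipA_stop (cs : List Char) (i : Nat) :
    ∀ (fuel j : Nat), cs.length - j ≤ fuel →
      ¬ (pvSkipA cs i fuel j < cs.length ∧ cs[pvSkipA cs i fuel j]! == cs[i]!) := by
  intro fuel
  induction fuel with
  | zero =>
    intro j h
    simp only [pvSkipA]
    exact fun hc => absurd hc.1 (by omega)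
  | succ fuel ih =>
    intro j h
    by_cases hc : j < cs.length ∧ cs[j]! == cs[i]!
    · simp only [pvSkipA]; rw [if_pos hc]; exact ih (j + 1) (by omega)
    · simp only [pvSkipA]; rw [if_neg hc]; exact hc

-- a run of m+1 equal characters starting at i contributes m pairs
theorem pairsCnt_run (cs : List Char) :
    ∀ (m i : Nat), i + 1 + m ≤ cs.length →
      (∀ k, i ≤ k → k < i + 1 + m → cs[k]! = cs[i]!) →
      pairsCnt (cs.drop i) = (m : Int) + pairsCnt (cs.drop (i + m)) := by
  intro m
  induction m with
  | zero => intro i _ _; simp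
  | succ m ih =>
    intro i hlen hrun
    have h1 : i + 1 < cs.length := by omega
    rw [pairsCnt_drop_step cs i h1]
    have he : cs[i]! = cs[i + 1]! := (hrun (i + 1) (by omega) (by omega)).symm
    rw [he, beq_self_eq_true, if_pos rfl]
    have hrun' : ∀ k, i + 1 ≤ k → k < (i + 1) + 1 + m → cs[k]! = cs[i + 1]! := by
      intro k hk1 hk2
      rw [hrun k (by omega) (by omega), ← he]
    rw [ih (i + 1) (by omega) hrun']
    have : i + 1 + m = i + (m + 1) := by omega
    rw [this]; push_cast; ring

-- A's outer loop at adjacent positions (i, i+1) counts the remaining equal adjacent pairs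
theorem pvLoopA_eq (cs : List Char) : ∀ (fuel i : Nat) (count : Int), cs.length - i ≤ fuel →
    pvLoopA cs fuel i (i + 1) count = count + pairsCnt (cs.drop i) := by
  intro fuel
  induction fuel with
  | zero =>
    intro i count h
    simp only [pvLoopA]
    rw [pairsCnt_drop_of_ge cs i (by omega)]; ring
  | succ fuel ih =>
    intro i count h
    by_cases hlt : i + 1 < cs.length
    · simp only [pvLoopA]; rw [if_pos hlt]
      by_cases heq : cs[i + 1]! = cs[i]!
      · rw [if_pos (beq_iff_eq.mpr heq)]
        set j' := pvSkipA cs i (cs.length - (i + 1)) (i + 1) with hj'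
        have hge : i + 1 ≤ j' := pvSkipA_ge cs i (cs.length - (i + 1)) (i + 1)
        have hle : j' ≤ cs.length := pvSkipA_le cs i (cs.length - (i + 1)) (i + 1) (by omega)
        have hrun : ∀ k, i ≤ k → k < j' → cs[k]! = cs[i]! := by
          intro k hk1 hk2
          rcases Nat.eq_or_lt_of_le hk1 with rfl | hk
          · rfl
          · exact pvSkipA_run cs i (cs.length - (i + 1)) (i + 1) k hk hk2
        show pvLoopA cs fuel j' (j' + 1) (count + ((j' : Int) - (i : Int) - 1)) =
          count + pairsCnt (cs.drop i)
        rw [ih j' (count + ((j' : Int) - (i : Int) - 1)) (by omega)]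
        have hres := pairsCnt_run cs (j' - 1 - i) i (by omega)
          (by intro k hk1 hk2; exact hrun k hk1 (by omega))
        have htail : pairsCnt (cs.drop (i + (j' - 1 - i))) = pairsCnt (cs.drop j') := by
          have hi : i + (j' - 1 - i) = j' - 1 := by omega
          rw [hi]
          by_cases hjl : j' < cs.length
          · have hstep : (j' - 1) + 1 < cs.length := by omega
            have h1 : (j' - 1) + 1 = j' := by omega
            rw [pairsCnt_drop_step cs (j' - 1) hstep, h1]
            have hne : cs[j' - 1]! ≠ cs[j']! := by
              have ha : cs[j' - 1]! = cs[i]! := hrun (j' - 1) (by omega) (by omega)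
              have hb : ¬ (cs[j']! == cs[i]!) = true := fun hh =>
                pvSkipA_stop cs i (cs.length - (i + 1)) (i + 1) (by omega) ⟨hjl, hh⟩
              rw [ha]; intro hc; exact hb (beq_iff_eq.mpr hc.symm)
            have hne' : (cs[j' - 1]! == cs[j']!) = false := beq_eq_false_iff_ne.mpr hne
            rw [if_neg (by rw [hne']; exact Bool.false_ne_true)]; ring
          · rw [pairsCnt_drop_of_ge cs (j' - 1) (by omega),
               pairsCnt_drop_of_ge cs j' (by omega)]
        rw [hres, htail]
        have : ((j' - 1 - i : Nat) : Int) = (j' : Int) - (i : Int) - 1 := by omega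
        rw [this]; ring
      · have hne1 : (cs[i + 1]! == cs[i]!) = false := beq_eq_false_iff_ne.mpr heq
        have hne2 : (cs[i]! == cs[i + 1]!) = false :=
          beq_eq_false_iff_ne.mpr (fun hc => heq hc.symm)
        rw [if_neg (by rw [hne1]; exact Bool.false_ne_true)]
        rw [ih (i + 1) count (by omega)]
        rw [pairsCnt_drop_step cs i hlt,
           if_neg (by rw [hne2]; exact Bool.false_ne_true)]
        ring
    · simp only [pvLoopA]; rw [if_neg hlt, pairsCnt_drop_of_ge cs i (by omega)]; ring

-- ===== VERDICT (by name: the statement is the Claim_ definition above) =====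
theorem alternatingCharacters_spec : Claim_equal_alternatingCharacters := by
  intro s _
  unfold Spec_alternatingCharacters alternatingCharacters alternatingCharacters_alt
  cases hcs : s.toList with
  | nil => simp [pvLoopA]
  | cons c rest =>
    show pvLoopA (c :: rest) (c :: rest).length 0 1 0 = pvLoopB rest c 0
    rw [pvLoopB_eq]
    have := pvLoopA_eq (c :: rest) (c :: rest).length 0 0 (by omega)
    simpa using this
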